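-- pv_equiv track=rewrite | github.com/philornot/InformatykaTrzeciaKlasa | matura2022maj/Zadanie2/Filip/interfejs.py | algorytm
-- ===== SOURCE A (Python) =====
-- def algorytm(s, n=None):
--     if not n:
--         n = len(s)
--
--     A = [0] * (n + 1)
--
--     for i in range(1, n + 1):
--         if s[i - 1] == 'a':
--             A[i] = A[i - 1] + 1
--         else:
--             A[i] = A[i - 1]
--
--     B = [0] * (n + 2)
--
--     for j in range(n, 0, -1):
--         if s[j - 1] == 'b':
--             B[j] = B[j + 1] + 1
--         else:
--             B[j] = B[j + 1]
--
--     k = 1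
--
--     for i in range(n + 1):
--         if A[i] + B[i + 1] > k:
--             k = A[i] + B[i + 1]
--
--     return k
-- ===== SOURCE B (Python) =====
-- def algorytm(s, n=None):
--     if not n:
--         n = len(s)
--
--     b_remaining = 0
--     for i in range(n):
--         if s[i] == 'b':
--             b_remaining += 1
--
--     best = b_remaining if b_remaining > 1 else 1
--     a_seen = 0
--     for i in range(n):
--         c = s[i]
--         if c == 'a':
--             a_seen += 1
--         elif c == 'b':
--             b_remaining -= 1
--         cur = a_seen + b_remaining
--         if cur > best:
--             best = cur
--
--     return best
-- ===== Notes on version B (the rewrite author's own statement) =====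
-- stated objective: simpler
-- what changed: Replaced the two prefix/suffix count arrays plus a third max-scan by a single forward sweep maintaining two scalars (a's seen so far, b's remaining) and a running best, seeded with the i=0 split.
import Mathlib
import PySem

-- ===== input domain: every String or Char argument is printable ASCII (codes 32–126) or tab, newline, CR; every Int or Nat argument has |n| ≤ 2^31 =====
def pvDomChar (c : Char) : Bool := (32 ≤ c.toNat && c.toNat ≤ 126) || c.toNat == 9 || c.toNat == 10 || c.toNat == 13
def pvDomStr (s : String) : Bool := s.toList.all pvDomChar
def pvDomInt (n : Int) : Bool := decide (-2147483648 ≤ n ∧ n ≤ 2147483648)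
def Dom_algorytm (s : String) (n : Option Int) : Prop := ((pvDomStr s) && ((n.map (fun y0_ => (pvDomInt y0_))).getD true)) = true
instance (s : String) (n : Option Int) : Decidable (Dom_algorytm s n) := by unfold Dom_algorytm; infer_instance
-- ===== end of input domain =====

-- B replaces A's two count arrays plus a final scan by one forward sweep over two scalars (objective: simpler, O(1) extra space).

-- ===== PORT A =====
-- 'if not n' is true for None and for 0, so both fall back to len(s)
def pyResolveN (s : String) (n : Option Int) : Int :=
  match n with
  | none => (s.toList.length : Int)
  | some m => if m = 0 then (s.toList.length : Int) else m

def algorytm (s : String) (n : Option Int) : Int :=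
  let cs := s.toList
  let nn := pyResolveN s n
  -- A = [0]*(n+1); for i in range(1, n+1): A[i] = A[i-1] (+1 if s[i-1]=='a')
  let Aarr := (PySem.List.pyRange 1 (nn + 1) 1).foldl
    (fun A i =>
      if PySem.List.pyGetD cs (i - 1) ' ' = 'a'
      then PySem.List.pySetD A i (PySem.List.pyGetD A (i - 1) 0 + 1)
      else PySem.List.pySetD A i (PySem.List.pyGetD A (i - 1) 0))
    (List.replicate (nn + 1).toNat (0 : Int))
  -- B = [0]*(n+2); for j in range(n, 0, -1): B[j] = B[j+1] (+1 if s[j-1]=='b')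
  let Barr := (PySem.List.pyRange nn 0 (-1)).foldl
    (fun B j =>
      if PySem.List.pyGetD cs (j - 1) ' ' = 'b'
      then PySem.List.pySetD B j (PySem.List.pyGetD B (j + 1) 0 + 1)
      else PySem.List.pySetD B j (PySem.List.pyGetD B (j + 1) 0))
    (List.replicate (nn + 2).toNat (0 : Int))
  -- k = 1; for i in range(n+1): if A[i] + B[i+1] > k: k = A[i] + B[i+1]
  (PySem.List.pyRange 0 (nn + 1) 1).foldl
    (fun k i =>
      if PySem.List.pyGetD Aarr i 0 + PySem.List.pyGetD Barr (i + 1) 0 > k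
      then PySem.List.pyGetD Aarr i 0 + PySem.List.pyGetD Barr (i + 1) 0
      else k)
    1

-- ===== PORT B =====
def algorytm_alt (s : String) (n : Option Int) : Int :=
  let cs := s.toList
  let nn := pyResolveN s n
  -- b_remaining = number of 'b' among the first n characters
  let bTot := (PySem.List.pyRange 0 nn 1).foldl
    (fun c i => if PySem.List.pyGetD cs i ' ' = 'b' then c + 1 else c) (0 : Int)
  -- single sweep with state (best, a_seen, b_remaining)
  let st := (PySem.List.pyRange 0 nn 1).foldl
    (fun (st : Int × Int × Int) i =>
      let c := PySem.List.pyGetD cs i ' '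
      let aSeen := if c = 'a' then st.2.1 + 1 else st.2.1
      let bRem := if c = 'a' then st.2.2 else if c = 'b' then st.2.2 - 1 else st.2.2
      let cur := aSeen + bRem
      (if cur > st.1 then cur else st.1, aSeen, bRem))
    ((if bTot > 1 then bTot else 1), 0, bTot)
  st.1

-- ===== PRECONDITION & SPEC =====
-- Pre_ excludes exactly the inputs on which A raises IndexError: an explicit n larger than len(s).
def Pre_algorytm (s : String) (n : Option Int) : Prop :=
  n.getD 0 ≤ (s.toList.length : Int)

instance (s : String) (n : Option Int) : Decidable (Pre_algorytm s n) := by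
  unfold Pre_algorytm; infer_instance

def pvWitness_algorytm : String × Option Int := ("abba", some 3)

def Spec_algorytm (s : String) (n : Option Int) (out : Int) : Prop := out = algorytm_alt s n
instance (s : String) (n : Option Int) (out : Int) : Decidable (Spec_algorytm s n out) := by unfold Spec_algorytm; infer_instance

-- ===== CLAIM (what is proved, stated in full; the proofs are below) =====
def Claim_equal_algorytm : Prop := ∀ (s : String) (n : Option Int), Dom_algorytm s n → Pre_algorytm s n → Spec_algorytm s n (algorytm s n)

-- ===== LEMMAS AND PROOFS =====

def cntA (t : List Char) : Int := (t.countP (fun c => c = 'a') : Int)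
lemma cntA_take_succ (t : List Char) (j : Nat) (hj : j < t.length) :
    cntA (t.take (j+1)) = cntA (t.take j) + (if t[j] = 'a' then 1 else 0) := by
  rw [List.take_add_one]
  simp only [cntA, List.countP_append]
  have : t[j]? = some t[j] := List.getElem?_eq_getElem hj
  rw [this]
  by_cases h : t[j] = 'a' <;> simp [h]

lemma LA (cs t : List Char) (m : Nat) (ht : t = cs.take m) (hm : m ≤ cs.length) :
    ∀ j, j ≤ m →
    (PySem.List.pyRange 1 ((j:Int)+1) 1).foldl
      (fun A i =>
        if PySem.List.pyGetD cs (i - 1) ' ' = 'a'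
        then PySem.List.pySetD A i (PySem.List.pyGetD A (i - 1) 0 + 1)
        else PySem.List.pySetD A i (PySem.List.pyGetD A (i - 1) 0))
      (List.replicate (m + 1) (0 : Int))
    = (List.range (j+1)).map (fun i => cntA (t.take i)) ++ List.replicate (m - j) 0 := by
  have hlt : t.length = m := by subst ht; simp [hm]
  intro j
  induction j with
  | zero =>
    intro _
    rw [PySem.List.pyRange_one_eq_nil (by norm_num)]
    simp [cntA, List.replicate_succ]
  | succ j ih =>
    intro hj
    have hjm : j < m := by omega
    have hjt : j < t.length := by omega
    rw [show ((j+1 : Nat) : Int) + 1 = ((j:Int)+1) + 1 by push_cast; ring,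
        PySem.List.pyRange_one_succ_right (by omega), List.foldl_append,
        ih (by omega)]
    simp only [List.foldl_cons, List.foldl_nil]
    have hchar : PySem.List.pyGetD cs ((j:Int) + 1 - 1) ' ' = t[j] := by
      have : ((j:Int) + 1 - 1) = ((j:Nat):Int) := by ring
      rw [this, PySem.List.pyGetD_natCast, List.getD_eq_getElem _ _ (by omega)]
      subst ht; simp
    have hread : PySem.List.pyGetD
        ((List.range (j+1)).map (fun i => cntA (t.take i)) ++ List.replicate (m - j) 0)
        ((j:Int) + 1 - 1) 0 = cntA (t.take j) := by
      have : ((j:Int) + 1 - 1) = ((j:Nat):Int) := by ring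
      rw [this, PySem.List.pyGetD_natCast]
      rw [List.getD_append _ _ _ _ (by simp)]
      exact PySem.List.getD_map_range _ _ _ _ (by omega)
    have hset : ∀ v : Int, PySem.List.pySetD
        ((List.range (j+1)).map (fun i => cntA (t.take i)) ++ List.replicate (m - j) 0)
        ((j:Int) + 1) v
        = (List.range (j+1)).map (fun i => cntA (t.take i)) ++ v :: List.replicate (m - (j+1)) 0 := by
      intro v
      rw [show ((j:Int) + 1) = (((j+1:Nat)):Int) by push_cast; ring, PySem.List.pySetD_natCast]
      rw [show m - j = (m - (j+1)) + 1 by omega, List.replicate_succ]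
      rw [show (j+1) = ((List.range (j+1)).map (fun i => cntA (t.take i))).length by simp]
      simp
    rw [hchar, hread]
    conv_rhs => rw [List.range_succ]
    by_cases h : t[j] = 'a' <;>
      simp only [h, if_true, if_false, hset, List.map_append, List.map_cons, List.map_nil,
        List.append_assoc, List.singleton_append, List.cons_append, List.nil_append] <;>
    · rw [cntA_take_succ t j hjt]
      simp [h]

def cntB (t : List Char) : Int := (t.countP (fun c => c = 'b') : Int)
lemma cntB_drop_eq (t : List Char) (j : Nat) (hj : j < t.length) :
    cntB (t.drop j) = (if t[j] = 'b' then 1 else 0) + cntB (t.drop (j+1)) := by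
  rw [List.drop_eq_getElem_cons hj]
  simp only [cntB, List.countP_cons]
  by_cases h : t[j] = 'b' <;> simp [h] <;> omega

lemma pyRange_neg_snoc (a b : Int) (h : b < a) :
    PySem.List.pyRange a b (-1) = PySem.List.pyRange a (b+1) (-1) ++ [b+1] := by
  rw [PySem.List.pyRange_neg_one_eq_reverse, PySem.List.pyRange_one_cons (by omega),
      List.reverse_cons, PySem.List.pyRange_neg_one_eq_reverse]

lemma LB (cs t : List Char) (m : Nat) (ht : t = cs.take m) (hm : m ≤ cs.length) :
    ∀ j, j ≤ m →
    (PySem.List.pyRange (m:Int) ((m - j : Nat) : Int) (-1)).foldl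
      (fun B j =>
        if PySem.List.pyGetD cs (j - 1) ' ' = 'b'
        then PySem.List.pySetD B j (PySem.List.pyGetD B (j + 1) 0 + 1)
        else PySem.List.pySetD B j (PySem.List.pyGetD B (j + 1) 0))
      (List.replicate (m + 2) (0 : Int))
    = List.replicate (m - j + 1) 0
      ++ (List.range (j+1)).map (fun k => cntB (t.drop (m - j + k))) := by
  have hlt : t.length = m := by subst ht; simp [hm]
  intro j
  induction j with
  | zero =>
    intro _
    rw [PySem.List.pyRange_neg_one_eq_nil (by omega)]
    have hd : t.drop m = [] := by rw [List.drop_eq_nil_of_le (by omega)]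
    simp [hd, cntB, ← List.replicate_succ']
  | succ j ih =>
    intro hj
    set b := m - (j+1) with hb
    have hbm : b < m := by omega
    have hbt : b < t.length := by omega
    have hmj : m - j = b + 1 := by omega
    rw [pyRange_neg_snoc _ _ (by omega), List.foldl_append,
        show ((b:Nat):Int) + 1 = ((m - j : Nat) : Int) by push_cast; omega,
        ih (by omega)]
    simp only [List.foldl_cons, List.foldl_nil]
    rw [hmj]
    have hchar : PySem.List.pyGetD cs (((b + 1 : Nat) : Int) - 1) ' ' = t[b] := by
      rw [show ((b + 1 : Nat) : Int) - 1 = ((b:Nat):Int) by push_cast; omega,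
          PySem.List.pyGetD_natCast, List.getD_eq_getElem _ _ (by omega)]
      subst ht; simp
    have hread : PySem.List.pyGetD
        (List.replicate (b + 1 + 1) 0 ++ (List.range (j+1)).map (fun k => cntB (t.drop (b + 1 + k))))
        (((b + 1 : Nat) : Int) + 1) 0 = cntB (t.drop (b + 1)) := by
      rw [show ((b + 1 : Nat) : Int) + 1 = ((b + 2 : Nat) : Int) by push_cast; omega,
          PySem.List.pyGetD_natCast]
      simp [List.getD]
    have hset : ∀ v : Int, PySem.List.pySetD
        (List.replicate (b + 1 + 1) 0 ++ (List.range (j+1)).map (fun k => cntB (t.drop (b + 1 + k))))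
        ((b + 1 : Nat) : Int) v
        = List.replicate (b + 1) 0
          ++ v :: (List.range (j+1)).map (fun k => cntB (t.drop (b + 1 + k))) := by
      intro v
      rw [PySem.List.pySetD_natCast, List.replicate_succ' (n := b + 1), List.append_assoc]
      rw [show (b+1) = (List.replicate (b+1) (0:Int)).length by simp]
      simp
    rw [hchar, hread]
    have hrhs : List.replicate (b + 1) (0:Int)
          ++ (List.range (j+1+1)).map (fun k => cntB (t.drop (b + k)))
        = List.replicate (b + 1) 0
          ++ cntB (t.drop b) :: (List.range (j+1)).map (fun k => cntB (t.drop (b + 1 + k))) := by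
      rw [List.range_succ_eq_map, List.map_cons, List.map_map]
      congr 2
      apply List.map_congr_left
      intro k _
      simp only [Function.comp_apply, Nat.succ_eq_add_one]
      rw [show b + (k+1) = b + 1 + k by omega]
    rw [hrhs]
    by_cases h : t[b] = 'b'
    · simp only [h, if_true, hset]
      rw [cntB_drop_eq t b hbt]
      simp [h]
      omega
    · simp only [h, if_false, hset]
      rw [cntB_drop_eq t b hbt]
      simp [h]

def runA (best a : Int) (u : List Char) : Int :=
  match u with
  | [] => best
  | c :: u' =>
    let a' := a + (if c = 'a' then 1 else 0)
    runA (max best (a' + cntB u')) a' u'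

lemma if_gt_eq_max (k x : Int) : (if x > k then x else k) = max k x := by
  rw [max_def]; split_ifs <;> omega

lemma cntA_cons (c : Char) (u : List Char) :
    cntA (c :: u) = (if c = 'a' then 1 else 0) + cntA u := by
  simp only [cntA, List.countP_cons]
  by_cases h : c = 'a' <;> simp [h] <;> omega

lemma cntB_cons (c : Char) (u : List Char) :
    cntB (c :: u) = (if c = 'b' then 1 else 0) + cntB u := by
  simp only [cntB, List.countP_cons]
  by_cases h : c = 'b' <;> simp [h] <;> omega

lemma L_run : ∀ (u : List Char) (a best : Int),
    (List.range u.length).foldl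
      (fun k j => max k (a + cntA (u.take (j+1)) + cntB (u.drop (j+1)))) best
    = runA best a u := by
  intro u
  induction u with
  | nil => intro a best; simp [runA]
  | cons c u' ih =>
    intro a best
    rw [show (c :: u').length = u'.length + 1 by simp, List.range_succ_eq_map]
    simp only [List.foldl_cons, List.foldl_map]
    rw [runA]
    have hfst : a + cntA ((c :: u').take (0+1)) + cntB ((c :: u').drop (0+1))
        = (a + (if c = 'a' then 1 else 0)) + cntB u' := by
      by_cases h : c = 'a' <;> simp [cntA, h] <;> try ring
    rw [hfst]
    have hbody : ∀ (k : Int) (j : Nat),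
        max k (a + cntA ((c :: u').take (j.succ+1)) + cntB ((c :: u').drop (j.succ+1)))
        = max k ((a + (if c = 'a' then 1 else 0)) + cntA (u'.take (j+1)) + cntB (u'.drop (j+1))) := by
      intro k j
      congr 1
      rw [Nat.succ_eq_add_one, show j + 1 + 1 = (j+1) + 1 by rfl,
          List.take_succ_cons, List.drop_succ_cons, cntA_cons]
      ring
    rw [PySem.List.foldl_congr_mem' _ _ _ _ (fun j _ k => hbody k j)]
    exact ih _ _

lemma L_B : ∀ (u : List Char) (best a : Int),
    (u.foldl (fun (st : Int × Int × Int) c =>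
        (if (if c = 'a' then st.2.1 + 1 else st.2.1) +
              (if c = 'a' then st.2.2 else if c = 'b' then st.2.2 - 1 else st.2.2) > st.1
         then (if c = 'a' then st.2.1 + 1 else st.2.1) +
              (if c = 'a' then st.2.2 else if c = 'b' then st.2.2 - 1 else st.2.2)
         else st.1,
         if c = 'a' then st.2.1 + 1 else st.2.1,
         if c = 'a' then st.2.2 else if c = 'b' then st.2.2 - 1 else st.2.2))
      (best, a, cntB u)) = (runA best a u, a + cntA u, 0) := by
  intro u
  induction u with
  | nil => intro best a; simp [runA, cntA, cntB]
  | cons c u' ih =>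
    intro best a
    rw [List.foldl_cons]
    have hbr : (if c = 'a' then cntB (c :: u') else if c = 'b' then cntB (c :: u') - 1 else cntB (c :: u'))
        = cntB u' := by
      rw [cntB_cons]
      by_cases h1 : c = 'a'
      · simp [h1]
      · by_cases h2 : c = 'b' <;> simp [h1, h2]
    dsimp only
    rw [hbr]
    have haS : (if c = 'a' then a + 1 else a) = a + (if c = 'a' then 1 else 0) := by
      by_cases h : c = 'a' <;> simp [h]
    rw [haS, if_gt_eq_max, ih]
    rw [runA]
    simp only [Prod.mk.injEq, cntA_cons]
    exact ⟨trivial, by ring, trivial⟩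

lemma A_val (cs : List Char) (m : Nat) (hm : m ≤ cs.length) :
    (PySem.List.pyRange 0 ((m:Int) + 1) 1).foldl
      (fun k i =>
        if PySem.List.pyGetD
            ((PySem.List.pyRange 1 ((m:Int) + 1) 1).foldl
              (fun A i =>
                if PySem.List.pyGetD cs (i - 1) ' ' = 'a'
                then PySem.List.pySetD A i (PySem.List.pyGetD A (i - 1) 0 + 1)
                else PySem.List.pySetD A i (PySem.List.pyGetD A (i - 1) 0))
              (List.replicate ((m:Int) + 1).toNat (0 : Int))) i 0 +
           PySem.List.pyGetD
            ((PySem.List.pyRange (m:Int) 0 (-1)).foldl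
              (fun B j =>
                if PySem.List.pyGetD cs (j - 1) ' ' = 'b'
                then PySem.List.pySetD B j (PySem.List.pyGetD B (j + 1) 0 + 1)
                else PySem.List.pySetD B j (PySem.List.pyGetD B (j + 1) 0))
              (List.replicate ((m:Int) + 2).toNat (0 : Int))) (i + 1) 0 > k
        then PySem.List.pyGetD
            ((PySem.List.pyRange 1 ((m:Int) + 1) 1).foldl
              (fun A i =>
                if PySem.List.pyGetD cs (i - 1) ' ' = 'a'
                then PySem.List.pySetD A i (PySem.List.pyGetD A (i - 1) 0 + 1)
                else PySem.List.pySetD A i (PySem.List.pyGetD A (i - 1) 0))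
              (List.replicate ((m:Int) + 1).toNat (0 : Int))) i 0 +
           PySem.List.pyGetD
            ((PySem.List.pyRange (m:Int) 0 (-1)).foldl
              (fun B j =>
                if PySem.List.pyGetD cs (j - 1) ' ' = 'b'
                then PySem.List.pySetD B j (PySem.List.pyGetD B (j + 1) 0 + 1)
                else PySem.List.pySetD B j (PySem.List.pyGetD B (j + 1) 0))
              (List.replicate ((m:Int) + 2).toNat (0 : Int))) (i + 1) 0
        else k)
      1
    = runA (max 1 (cntB (cs.take m))) 0 (cs.take m) := by
  set t := cs.take m with ht
  have hlt : t.length = m := by rw [ht]; simp [hm]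
  have h1 : ((m:Int) + 1).toNat = m + 1 := by omega
  have h2 : ((m:Int) + 2).toNat = m + 2 := by omega
  rw [h1, h2]
  have hLA := LA cs t m ht hm m le_rfl
  have hLB := LB cs t m ht hm m le_rfl
  simp only [Nat.sub_self, Nat.cast_zero, List.replicate_zero, List.append_nil, Nat.zero_add,
    zero_add, List.replicate_one, List.singleton_append] at hLA hLB
  rw [hLA, hLB]
  rw [show (m:Int) + 1 = ((m + 1 : Nat) : Int) by push_cast; ring,
      PySem.List.pyRange_zero_natCast, List.foldl_map]
  have hbody : ∀ i ∈ List.range (m+1), ∀ (k : Int),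
      (if PySem.List.pyGetD ((List.range (m+1)).map (fun i => cntA (t.take i))) ((i:Nat):Int) 0 +
           PySem.List.pyGetD ((0:Int) :: (List.range (m+1)).map (fun k => cntB (t.drop k))) (((i:Nat):Int) + 1) 0 > k
       then PySem.List.pyGetD ((List.range (m+1)).map (fun i => cntA (t.take i))) ((i:Nat):Int) 0 +
           PySem.List.pyGetD ((0:Int) :: (List.range (m+1)).map (fun k => cntB (t.drop k))) (((i:Nat):Int) + 1) 0
       else k)
      = max k (cntA (t.take i) + cntB (t.drop i)) := by
    intro i hi k
    have him : i < m + 1 := List.mem_range.mp hi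
    have hA : PySem.List.pyGetD ((List.range (m+1)).map (fun i => cntA (t.take i))) ((i:Nat):Int) 0
        = cntA (t.take i) := by
      rw [PySem.List.pyGetD_natCast]
      exact PySem.List.getD_map_range _ _ _ _ him
    have hB : PySem.List.pyGetD ((0:Int) :: (List.range (m+1)).map (fun k => cntB (t.drop k))) (((i:Nat):Int) + 1) 0
        = cntB (t.drop i) := by
      rw [show ((i:Nat):Int) + 1 = ((i + 1 : Nat) : Int) by push_cast; ring,
          PySem.List.pyGetD_natCast]
      simpa using PySem.List.getD_map_range (fun k => cntB (t.drop k)) (m+1) i 0 him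
    rw [hA, hB, if_gt_eq_max]
  rw [PySem.List.foldl_congr_mem' _ _ (fun (k : Int) (i : Nat) => max k (cntA (t.take i) + cntB (t.drop i))) _ hbody]
  rw [List.range_succ_eq_map, List.foldl_cons, List.foldl_map]
  have h0 : max 1 (cntA (t.take 0) + cntB (t.drop 0)) = max 1 (cntB t) := by
      simp [cntA]
  rw [h0]
  have hb : ∀ (k : Int) (j : Nat),
      max k (cntA (t.take j.succ) + cntB (t.drop j.succ))
      = max k (0 + cntA (t.take (j+1)) + cntB (t.drop (j+1))) := by
    intro k j
    simp [Nat.succ_eq_add_one]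
  rw [PySem.List.foldl_congr_mem' _ _ _ _ (fun j _ k => hb k j)]
  have := L_run t 0 (max 1 (cntB t))
  rw [hlt] at this
  exact this

lemma B_val (cs : List Char) (m : Nat) (hm : m ≤ cs.length) :
    ((PySem.List.pyRange 0 (m:Int) 1).foldl
      (fun (st : Int × Int × Int) i =>
        (if (if PySem.List.pyGetD cs i ' ' = 'a' then st.2.1 + 1 else st.2.1) +
              (if PySem.List.pyGetD cs i ' ' = 'a' then st.2.2
               else if PySem.List.pyGetD cs i ' ' = 'b' then st.2.2 - 1 else st.2.2) > st.1
         then (if PySem.List.pyGetD cs i ' ' = 'a' then st.2.1 + 1 else st.2.1) +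
              (if PySem.List.pyGetD cs i ' ' = 'a' then st.2.2
               else if PySem.List.pyGetD cs i ' ' = 'b' then st.2.2 - 1 else st.2.2)
         else st.1,
         if PySem.List.pyGetD cs i ' ' = 'a' then st.2.1 + 1 else st.2.1,
         if PySem.List.pyGetD cs i ' ' = 'a' then st.2.2
         else if PySem.List.pyGetD cs i ' ' = 'b' then st.2.2 - 1 else st.2.2))
      ((if (PySem.List.pyRange 0 (m:Int) 1).foldl
            (fun c i => if PySem.List.pyGetD cs i ' ' = 'b' then c + 1 else c) (0 : Int) > 1
        then (PySem.List.pyRange 0 (m:Int) 1).foldl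
            (fun c i => if PySem.List.pyGetD cs i ' ' = 'b' then c + 1 else c) (0 : Int)
        else 1), 0,
       (PySem.List.pyRange 0 (m:Int) 1).foldl
            (fun c i => if PySem.List.pyGetD cs i ' ' = 'b' then c + 1 else c) (0 : Int))).1
    = runA (max 1 (cntB (cs.take m))) 0 (cs.take m) := by
  set t := cs.take m with ht
  have hlt : t.length = m := by rw [ht]; simp [hm]
  have hchar : ∀ i ∈ PySem.List.pyRange 0 (m:Int) 1,
      PySem.List.pyGetD cs i ' ' = PySem.List.pyGetD t i ' ' := by
    intro i hi
    have hib := (PySem.List.mem_pyRange_one).mp hi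
    have hic : i < (cs.length : Int) := by
      have := hib.2
      have : (m : Int) ≤ (cs.length : Int) := by exact_mod_cast hm
      omega
    have hit : i < (t.length : Int) := by rw [hlt]; exact hib.2
    rw [PySem.List.pyGetD_eq_getElem cs ' ' hib.1 hic,
        PySem.List.pyGetD_eq_getElem t ' ' hib.1 hit]
    exact (List.getElem_take).symm
  have hmt : (m : Int) = (t.length : Int) := by rw [hlt]
  have hbTot : (PySem.List.pyRange 0 (m:Int) 1).foldl
      (fun c i => if PySem.List.pyGetD cs i ' ' = 'b' then c + 1 else c) (0 : Int) = cntB t := by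
    rw [PySem.List.foldl_congr_mem' _ _
        (fun c i => if PySem.List.pyGetD t i ' ' = 'b' then c + 1 else c) _
        (fun i hi c => by rw [hchar i hi])]
    rw [hmt, PySem.List.foldl_pyRange_zero_pyGetD' t ' '
        (fun c ch => if ch = 'b' then c + 1 else c) 0]
    rw [PySem.List.foldl_ite_add_one (fun ch => ch = 'b') t 0]
    simp [cntB]
  rw [hbTot]
  rw [PySem.List.foldl_congr_mem' _ _
      (fun (st : Int × Int × Int) i =>
        (if (if PySem.List.pyGetD t i ' ' = 'a' then st.2.1 + 1 else st.2.1) +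
              (if PySem.List.pyGetD t i ' ' = 'a' then st.2.2
               else if PySem.List.pyGetD t i ' ' = 'b' then st.2.2 - 1 else st.2.2) > st.1
         then (if PySem.List.pyGetD t i ' ' = 'a' then st.2.1 + 1 else st.2.1) +
              (if PySem.List.pyGetD t i ' ' = 'a' then st.2.2
               else if PySem.List.pyGetD t i ' ' = 'b' then st.2.2 - 1 else st.2.2)
         else st.1,
         if PySem.List.pyGetD t i ' ' = 'a' then st.2.1 + 1 else st.2.1,
         if PySem.List.pyGetD t i ' ' = 'a' then st.2.2
         else if PySem.List.pyGetD t i ' ' = 'b' then st.2.2 - 1 else st.2.2)) _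
      (fun i hi st => by rw [hchar i hi])]
  rw [hmt, PySem.List.foldl_pyRange_zero_pyGetD' t ' '
      (fun (st : Int × Int × Int) c =>
        (if (if c = 'a' then st.2.1 + 1 else st.2.1) +
              (if c = 'a' then st.2.2 else if c = 'b' then st.2.2 - 1 else st.2.2) > st.1
         then (if c = 'a' then st.2.1 + 1 else st.2.1) +
              (if c = 'a' then st.2.2 else if c = 'b' then st.2.2 - 1 else st.2.2)
         else st.1,
         if c = 'a' then st.2.1 + 1 else st.2.1,
         if c = 'a' then st.2.2 else if c = 'b' then st.2.2 - 1 else st.2.2)) _]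
  rw [if_gt_eq_max 1 (cntB t), L_B t (max 1 (cntB t)) 0]

lemma main_eq (s : String) (n : Option Int) (hPre : Pre_algorytm s n) :
    algorytm s n = algorytm_alt s n := by
  have hnn : pyResolveN s n ≤ (s.toList.length : Int) := by
    unfold Pre_algorytm at hPre
    unfold pyResolveN
    cases n with
    | none => simp
    | some m => simp at hPre ⊢; split_ifs <;> simp [hPre]
  simp only [algorytm, algorytm_alt]
  set cs := s.toList with hcs
  set nn := pyResolveN s n with hn
  by_cases hneg : nn < 0
  · rw [PySem.List.pyRange_one_eq_nil (a := 0) (b := nn + 1) (by omega),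
        PySem.List.pyRange_one_eq_nil (a := 0) (b := nn) (by omega)]
    simp
  · have h0 : 0 ≤ nn := by omega
    set m := nn.toNat with hm
    have hmn : nn = (m : Int) := by omega
    have hmle : m ≤ cs.length := by omega
    rw [hmn]
    rw [A_val cs m hmle, B_val cs m hmle]

-- ===== VERDICT (by name: the statement is the Claim_ definition above) =====
theorem algorytm_spec : Claim_equal_algorytm := by
  intro s n _ hPre
  unfold Spec_algorytm
  exact main_eq s n hPre
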